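-- pv_equiv track=rewrite | github.com/pokerdio/generic | e/e-288.py | go
-- ===== SOURCE A (Python) =====
-- def go(p, q, k):
--     """the result must be given mod p**k"""
--
--     ret = 0
--     pk = p ** k
--
--     x = 0
--     digitz = yielddigitz(p, q, k)
--
--     pepe = 1
--     for _ in range(k):
--         x = x + next(digitz) * pepe
--         pepe *= p
--     pk = p ** k
--     while True:
--         ret += x
--         ret %= pk
--         x //= p
--         next_digit = next(digitz, None)
--         if type(next_digit) == int:
--             x += next_digit * p ** (k - 1)
--         else:
--             break
--     return ret
--
-- def yielddigitz(p, q, k):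
--     s = 290797
--
--     for i in range(q):
--         s = s * s % 50515093
--         yield s % p  # skippin the first digit
--     for i in range(k + 5):
--         yield 0
-- ===== SOURCE B (Python) =====
-- def go(p, q, k):
--     """the result must be given mod p**k"""
--     # One pass over the PRNG digits: every digit at position i >= k-1 enters the
--     # answer with the same constant coefficient G = 1 + p + ... + p^(k-1), so we
--     # only sum those digits and multiply once; the first k-1 digits get partial
--     # geometric prefixes.  O(q + k) instead of A's O(q*k) digit shifting.
--     pk = p ** k
--     s = 290797
--     total = 0      # sum of digits with the full geometric coefficient
--     boundary = 0   # contribution of digits i < k-1 (partial prefix coefficient)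
--     pref = 0
--     pw = 1
--     for i in range(q):
--         s = s * s % 50515093
--         d = s % p
--         if i < k - 1:
--             pref += pw
--             pw *= p
--             boundary += d * pref
--         else:
--             total += d
--     geo = k if p == 1 else (p ** k - 1) // (p - 1)
--     return (boundary + total * geo) % pk
-- ===== Notes on version B (the rewrite author's own statement) =====
-- stated objective: faster
-- what changed: Instead of sliding a k-digit window and floor-shifting it once per position (O(q*k) digit work), B makes one pass over the PRNG digits, sums the digits at positions >= k-1 and multiplies that sum once by the constant geometric coefficient 1+p+...+p^(k-1), handling the first k-1 digits with partial prefix coefficients.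
-- outside the precondition, e.g. on go(3, 2, 0): A returns 0.6666666666666666, B returns 0; on go(3, 2, -1): A returns 0.2222222222222222, B returns 0.3333333333333332
import Mathlib
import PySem

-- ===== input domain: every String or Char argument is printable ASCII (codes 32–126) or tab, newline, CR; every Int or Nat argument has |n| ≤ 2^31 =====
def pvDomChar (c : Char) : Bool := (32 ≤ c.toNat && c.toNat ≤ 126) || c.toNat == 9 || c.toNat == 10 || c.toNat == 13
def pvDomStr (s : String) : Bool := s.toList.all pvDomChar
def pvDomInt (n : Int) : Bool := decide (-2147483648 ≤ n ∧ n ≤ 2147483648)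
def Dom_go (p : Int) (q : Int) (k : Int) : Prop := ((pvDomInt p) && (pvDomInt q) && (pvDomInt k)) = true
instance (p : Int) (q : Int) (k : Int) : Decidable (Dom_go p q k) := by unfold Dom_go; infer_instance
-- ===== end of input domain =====

-- B replaces A's per-position k-digit window shifting by a single pass over the digits with one
-- constant geometric coefficient (objective: faster; measured faster in a timing run).

-- ===== PORT A =====
-- the generator yielddigitz: q PRNG digits, then k+5 zeros (materialised as a list)
def goDigitz (p : Int) : Int → Nat → List Int → List Int
  | _, 0, acc => acc.reverse
  | s, n + 1, acc =>
      let s' := PySem.Int.mod (s * s) 50515093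
      goDigitz p s' n (PySem.Int.mod s' p :: acc)

-- the first for-loop: x = x + next(digitz) * pepe; pepe *= p, k times
def goInit (p : Int) : Nat → List Int → Int → Int → Int × List Int
  | 0, ds, x, _ => (x, ds)
  | _ + 1, [], x, _ => (x, [])
  | n + 1, d :: ds, x, pepe => goInit p n ds (x + d * pepe) (pepe * p)

-- the while loop: ret += x; ret %= pk; x //= p; x += next_digit * p**(k-1), until exhausted
def goWhile (pk p pkm1 : Int) : List Int → Int → Int → Int
  | [], ret, x => PySem.Int.mod (ret + x) pk
  | d :: ds, ret, x =>
      goWhile pk p pkm1 ds (PySem.Int.mod (ret + x) pk)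
        (PySem.Int.floordiv x p + d * pkm1)

def go (p : Int) (q : Int) (k : Int) : Int :=
  let digitz := goDigitz p 290797 q.toNat [] ++ List.replicate (k + 5).toNat 0
  let pk := p ^ k.toNat
  let ix := goInit p k.toNat digitz 0 1
  goWhile pk p (p ^ (k.toNat - 1)) ix.2 0 ix.1

-- ===== PORT B =====
-- one pass over the q PRNG digits; returns (total, boundary)
def goAltLoop (p k : Int) : Nat → Int → Int → Int → Int → Int → Int → Int × Int
  | 0, _, _, total, boundary, _, _ => (total, boundary)
  | n + 1, i, s, total, boundary, pref, pw =>
      let s' := PySem.Int.mod (s * s) 50515093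
      let d := PySem.Int.mod s' p
      if i < k - 1 then
        goAltLoop p k n (i + 1) s' total (boundary + d * (pref + pw)) (pref + pw) (pw * p)
      else
        goAltLoop p k n (i + 1) s' (total + d) boundary pref pw

def go_alt (p : Int) (q : Int) (k : Int) : Int :=
  let pk := p ^ k.toNat
  let tb := goAltLoop p k q.toNat 0 290797 0 0 0 1
  let geo := if p = 1 then k else PySem.Int.floordiv (p ^ k.toNat - 1) (p - 1)
  PySem.Int.mod (tb.2 + tb.1 * geo) pk

-- ===== PRECONDITION & SPEC =====
-- Pre_ excludes p = 0, where A raises ZeroDivisionError, and k ≤ 0, where A's p**k / p**(k-1)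
-- are Python floats so A returns a float instead of an int.
def Pre_go (p : Int) (q : Int) (k : Int) : Prop := p ≠ 0 ∧ 1 ≤ k
instance (p : Int) (q : Int) (k : Int) : Decidable (Pre_go p q k) := by
  unfold Pre_go; infer_instance

def pvWitness_go : Int × Int × Int := (10, 5, 3)

def Spec_go (p : Int) (q : Int) (k : Int) (out : Int) : Prop := out = go_alt p q k
instance (p : Int) (q : Int) (k : Int) (out : Int) : Decidable (Spec_go p q k out) := by
  unfold Spec_go; infer_instance

-- ===== CLAIM (what is proved, stated in full; the proofs are below) =====
def Claim_equal_go : Prop :=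
  ∀ (p : Int) (q : Int) (k : Int), Dom_go p q k → Pre_go p q k → Spec_go p q k (go p q k)

-- ===== LEMMAS AND PROOFS =====

theorem pymod_eq (a b : Int) : PySem.Int.mod a b = Int.fmod a b := by
  unfold PySem.Int.mod; rfl

theorem pydiv_eq (a b : Int) : PySem.Int.floordiv a b = Int.fdiv a b := by
  unfold PySem.Int.floordiv; rfl

-- abstract PRNG stream and its digits
def sseq : Nat → Int
  | 0 => 290797
  | n + 1 => Int.fmod (sseq n * sseq n) 50515093

def dig (p : Int) (i : Nat) : Int := Int.fmod (sseq (i + 1)) p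

-- the digit stream padded with zeros beyond position qn
def digP (p : Int) (qn i : Nat) : Int := if i < qn then dig p i else 0

-- the k-digit window starting at position t (little-endian in powers of p)
def win (p : Int) (qn kn t : Nat) : Int :=
  ∑ j ∈ Finset.range kn, digP p qn (t + j) * p ^ j

-- the (partial) geometric coefficient picked up by digit i
def coefC (p : Int) (kn i : Nat) : Int := ∑ j ∈ Finset.range (min kn (i + 1)), p ^ j

theorem fdiv_fmod_self (z p : Int) (hp : p ≠ 0) : (Int.fmod z p).fdiv p = 0 := by
  have h := Int.mul_fdiv_add_fmod (Int.fmod z p) p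
  have h2 : (Int.fmod z p).fmod p = Int.fmod z p := Int.fmod_fmod_of_dvd _ dvd_rfl
  have h3 : p * (Int.fmod z p).fdiv p = 0 := by omega
  exact (mul_eq_zero.mp h3).resolve_left hp

theorem fdiv_digP (p : Int) (qn i : Nat) (hp : p ≠ 0) : (digP p qn i).fdiv p = 0 := by
  unfold digP dig
  split
  · exact fdiv_fmod_self _ _ hp
  · exact Int.zero_fdiv p

theorem goDigitz_eq (p : Int) (n t : Nat) (acc : List Int) :
    goDigitz p (sseq t) n acc
      = acc.reverse ++ (List.range n).map (fun u => dig p (t + u)) := by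
  induction n generalizing t acc with
  | zero => simp [goDigitz]
  | succ n ih =>
      have hs : PySem.Int.mod (sseq t * sseq t) 50515093 = sseq (t + 1) := by
        rw [pymod_eq]; rfl
      rw [goDigitz]
      simp only [hs]
      have hd : PySem.Int.mod (sseq (t + 1)) p = dig p t := by rw [pymod_eq]; rfl
      rw [hd, ih (t + 1), List.range_succ_eq_map, List.map_cons, List.map_map]
      simp only [List.reverse_cons, List.append_assoc, List.singleton_append, Nat.add_zero]
      refine congrArg _ (congrArg₂ _ rfl (List.map_congr_left fun u _ => ?_))
      simp only [Function.comp]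
      congr 1
      omega

theorem goInit_eq (p : Int) (n : Nat) (g : Nat → Int) (rest : List Int) (x c : Int) :
    goInit p n ((List.range n).map g ++ rest) x c
      = (x + ∑ j ∈ Finset.range n, g j * (c * p ^ j), rest) := by
  induction n generalizing g x c with
  | zero => simp [goInit]
  | succ n ih =>
      rw [List.range_succ_eq_map, List.map_cons, List.map_map, List.cons_append, goInit]
      have hc : g ∘ Nat.succ = fun j => g (j + 1) := rfl
      rw [hc, ih (fun j => g (j + 1)) (x + g 0 * c) (c * p)]
      congr 1
      rw [Finset.sum_range_succ']
      ring_nf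
      rw [Finset.sum_congr rfl fun j _ => ?_]
      ring

theorem digitz_split (p : Int) (qn kn : Nat) :
    goDigitz p 290797 qn [] ++ List.replicate (kn + 5) (0 : Int)
      = (List.range kn).map (digP p qn)
        ++ (List.range (qn + 5)).map (fun u => digP p qn (kn + u)) := by
  have h0 : (290797 : Int) = sseq 0 := rfl
  have hfull : goDigitz p 290797 qn [] ++ List.replicate (kn + 5) (0 : Int)
      = (List.range (qn + (kn + 5))).map (digP p qn) := by
    rw [h0, goDigitz_eq, List.reverse_nil, List.nil_append, List.range_add, List.map_append, List.map_map]
    congr 1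
    · refine List.map_congr_left fun u hu => ?_
      simp only [List.mem_range] at hu
      simp [digP, hu]
    · have : (List.range (kn + 5)).map (digP p qn ∘ (qn + ·))
          = (List.range (kn + 5)).map (fun _ => (0 : Int)) := by
        refine List.map_congr_left fun u _ => ?_
        simp [Function.comp, digP]
      rw [this, List.map_const', List.length_range]
  rw [hfull]
  have h2 : qn + (kn + 5) = kn + (qn + 5) := by omega
  rw [h2, List.range_add, List.map_append, List.map_map]
  rfl

theorem win_shift (p : Int) (qn kn t : Nat) (hp : p ≠ 0) (hk : 1 ≤ kn) :
    win p qn kn (t + 1)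
      = (win p qn kn t).fdiv p + digP p qn (t + kn) * p ^ (kn - 1) := by
  obtain ⟨m, rfl⟩ : ∃ m, kn = m + 1 := ⟨kn - 1, by omega⟩
  have hwt : win p qn (m + 1) t
      = digP p qn t + p * ∑ j ∈ Finset.range m, digP p qn (t + 1 + j) * p ^ j := by
    rw [win, Finset.sum_range_succ']
    rw [Finset.mul_sum]
    simp only [pow_zero, mul_one, pow_succ]
    rw [add_comm]
    congr 1
    refine Finset.sum_congr rfl fun j _ => ?_
    have : t + (j + 1) = t + 1 + j := by omega
    rw [this]; ring
  have hdiv : (win p qn (m + 1) t).fdiv p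
      = ∑ j ∈ Finset.range m, digP p qn (t + 1 + j) * p ^ j := by
    rw [hwt, Int.add_mul_fdiv_left _ _ hp, fdiv_digP p qn t hp, zero_add]
  rw [hdiv]
  rw [win, Finset.sum_range_succ]
  simp only [Nat.add_sub_cancel]
  have h1 : t + 1 + m = t + (m + 1) := by omega
  rw [h1]

theorem goWhile_eq (p : Int) (qn kn : Nat) (hp : p ≠ 0) (hk : 1 ≤ kn) (n t : Nat) (ret : Int) :
    goWhile (p ^ kn) p (p ^ (kn - 1))
        ((List.range n).map (fun u => digP p qn (kn + t + u))) ret (win p qn kn t)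
      = Int.fmod (ret + ∑ u ∈ Finset.range (n + 1), win p qn kn (t + u)) (p ^ kn) := by
  induction n generalizing t ret with
  | zero => simp [goWhile, pymod_eq]
  | succ n ih =>
      rw [List.range_succ_eq_map, List.map_cons, List.map_map, goWhile, pymod_eq, pydiv_eq]
      have hx : (win p qn kn t).fdiv p + digP p qn (kn + t + 0) * p ^ (kn - 1)
          = win p qn kn (t + 1) := by
        have e : kn + t + 0 = t + kn := by omega
        rw [e]
        exact (win_shift p qn kn t hp hk).symm
      have hl : (List.range n).map ((fun u => digP p qn (kn + t + u)) ∘ Nat.succ)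
          = (List.range n).map (fun u => digP p qn (kn + (t + 1) + u)) := by
        refine List.map_congr_left fun u _ => ?_
        simp only [Function.comp]
        congr 1
        omega
      rw [hx, hl, ih (t + 1)]
      rw [Int.fmod_add_fmod]
      congr 1
      conv_rhs => rw [Finset.sum_range_succ']
      have h2 : ∑ u ∈ Finset.range (n + 1), win p qn kn (t + 1 + u)
          = ∑ u ∈ Finset.range (n + 1), win p qn kn (t + (u + 1)) := by
        refine Finset.sum_congr rfl fun u _ => ?_
        congr 1
        omega
      rw [h2]
      simp only [Nat.add_zero]
      ring

theorem go_char (p q k : Int) (hp : p ≠ 0) (hk : 1 ≤ k) :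
    go p q k
      = Int.fmod (∑ t ∈ Finset.range (q.toNat + 6), win p q.toNat k.toNat t) (p ^ k.toNat) := by
  have hk5 : (k + 5).toNat = k.toNat + 5 := by omega
  have hkn : 1 ≤ k.toNat := by omega
  unfold go
  dsimp only
  rw [hk5, digitz_split p q.toNat k.toNat,
    goInit_eq p k.toNat (digP p q.toNat) _ 0 1]
  have hx : (0 : Int) + ∑ j ∈ Finset.range k.toNat, digP p q.toNat j * (1 * p ^ j)
      = win p q.toNat k.toNat 0 := by
    rw [zero_add, win]
    refine Finset.sum_congr rfl fun j _ => ?_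
    rw [Nat.zero_add, one_mul]
  have hl : (List.range (q.toNat + 5)).map (fun u => digP p q.toNat (k.toNat + u))
      = (List.range (q.toNat + 5)).map (fun u => digP p q.toNat (k.toNat + 0 + u)) := by
    refine List.map_congr_left fun u _ => ?_
    norm_num
  simp only [hx, hl]
  rw [goWhile_eq p q.toNat k.toNat hp hkn (q.toNat + 5) 0 0]
  rw [zero_add]
  simp only [Nat.zero_add]

theorem goAltLoop_eq (p : Int) (kn : Nat) (hkn : 1 ≤ kn) (n t : Nat) (total boundary : Int) :
    goAltLoop p (kn : Int) n (t : Int) (sseq t) total boundary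
        (∑ j ∈ Finset.range (min t (kn - 1)), p ^ j) (p ^ min t (kn - 1))
      = (total + ∑ u ∈ Finset.range n, (if kn - 1 ≤ t + u then dig p (t + u) else 0),
         boundary + ∑ u ∈ Finset.range n,
           (if t + u < kn - 1 then dig p (t + u) * coefC p kn (t + u) else 0)) := by
  induction n generalizing t total boundary with
  | zero => simp [goAltLoop]
  | succ n ih =>
      rw [goAltLoop]
      have hs : PySem.Int.mod (sseq t * sseq t) 50515093 = sseq (t + 1) := by
        rw [pymod_eq]; rfl
      simp only [hs, pymod_eq]
      have hd : (sseq (t + 1)).fmod p = dig p t := rfl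
      have hcond : ((t : Int) < (kn : Int) - 1) ↔ (t < kn - 1) := by
        omega
      have hcast : ((t : Int) + 1) = ((t + 1 : Nat) : Int) := by push_cast; ring
      by_cases hb : t < kn - 1
      · rw [if_pos (by exact_mod_cast hcond.mpr hb)]
        have hmt : min t (kn - 1) = t := by omega
        have hmt1 : min (t + 1) (kn - 1) = t + 1 := by omega
        have hpref : (∑ j ∈ Finset.range (min t (kn - 1)), p ^ j) + p ^ min t (kn - 1)
            = ∑ j ∈ Finset.range (min (t + 1) (kn - 1)), p ^ j := by
          rw [hmt, hmt1, Finset.sum_range_succ]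
        have hpw : p ^ min t (kn - 1) * p = p ^ min (t + 1) (kn - 1) := by
          rw [hmt, hmt1, pow_succ]
        rw [hd, hpref, hpw, hcast, ih]
        have hS : (∑ j ∈ Finset.range (min (t + 1) (kn - 1)), p ^ j) = coefC p kn t := by
          rw [hmt1, coefC, show min kn (t + 1) = t + 1 by omega]
        rw [hS]
        simp only [Prod.mk.injEq]
        constructor
        · conv_rhs => rw [Finset.sum_range_succ']
          have h0 : (if kn - 1 ≤ t + 0 then dig p (t + 0) else 0) = 0 := by
            rw [if_neg (by omega)]
          rw [h0, add_zero]
          congr 1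
          refine Finset.sum_congr rfl fun u _ => ?_
          have : t + (u + 1) = t + 1 + u := by omega
          rw [this]
        · conv_rhs => rw [Finset.sum_range_succ']
          have h0 : (if t + 0 < kn - 1 then dig p (t + 0) * coefC p kn (t + 0) else 0)
              = dig p t * coefC p kn t := by
            rw [if_pos (by omega)]
            norm_num
          rw [h0]
          have hsum : ∑ u ∈ Finset.range n,
                (if t + (u + 1) < kn - 1 then dig p (t + (u + 1)) * coefC p kn (t + (u + 1)) else 0)
              = ∑ u ∈ Finset.range n,
                (if t + 1 + u < kn - 1 then dig p (t + 1 + u) * coefC p kn (t + 1 + u) else 0) := by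
            refine Finset.sum_congr rfl fun u _ => ?_
            have : t + (u + 1) = t + 1 + u := by omega
            rw [this]
          rw [hsum]
          ring
      · rw [if_neg (by intro h; exact hb (hcond.mp h))]
        have hmt1 : min (t + 1) (kn - 1) = min t (kn - 1) := by omega
        rw [hd, hcast]
        have key := ih (t + 1) (total + dig p t) boundary
        rw [hmt1] at key
        rw [key]
        simp only [Prod.mk.injEq]
        constructor
        · conv_rhs => rw [Finset.sum_range_succ']
          have h0 : (if kn - 1 ≤ t + 0 then dig p (t + 0) else 0) = dig p t := by
            rw [if_pos (by omega)]
            norm_num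
          rw [h0]
          have hsum : ∑ u ∈ Finset.range n, (if kn - 1 ≤ t + (u + 1) then dig p (t + (u + 1)) else 0)
              = ∑ u ∈ Finset.range n, (if kn - 1 ≤ t + 1 + u then dig p (t + 1 + u) else 0) := by
            refine Finset.sum_congr rfl fun u _ => ?_
            have : t + (u + 1) = t + 1 + u := by omega
            rw [this]
          rw [hsum]
          ring
        · conv_rhs => rw [Finset.sum_range_succ']
          have h0 : (if t + 0 < kn - 1 then dig p (t + 0) * coefC p kn (t + 0) else 0) = 0 := by
            rw [if_neg (by omega)]
          rw [h0, add_zero]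
          congr 1
          refine Finset.sum_congr rfl fun u _ => ?_
          have : t + (u + 1) = t + 1 + u := by omega
          rw [this]

theorem geo_eq (p : Int) (kn : Nat) :
    (if p = 1 then ((kn : Nat) : Int) else PySem.Int.floordiv (p ^ kn - 1) (p - 1))
      = ∑ j ∈ Finset.range kn, p ^ j := by
  by_cases h1 : p = 1
  · subst h1
    simp
  · rw [if_neg h1, pydiv_eq, ← geom_sum_mul p kn,
      Int.mul_fdiv_cancel _ (sub_ne_zero.mpr h1)]

theorem digSumShift (p : Int) (qn j : Nat) :
    ∑ t ∈ Finset.range (qn + 6), digP p qn (t + j)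
      = ∑ i ∈ Finset.range qn, (if j ≤ i then dig p i else 0) := by
  have step1 : ∑ t ∈ Finset.range (qn + 6), digP p qn (t + j)
      = ∑ t ∈ Finset.range (qn - j), dig p (t + j) := by
    rw [← Finset.sum_subset (by intro x hx; simp only [Finset.mem_range] at hx ⊢; omega :
        Finset.range (qn - j) ⊆ Finset.range (qn + 6))
      (fun t ht hts => ?_)]
    · refine Finset.sum_congr rfl fun t ht => ?_
      simp only [Finset.mem_range] at ht
      rw [digP, if_pos (by omega)]
    · simp only [Finset.mem_range] at ht hts
      rw [digP, if_neg (by omega)]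
  have step2 : ∑ i ∈ Finset.range qn, (if j ≤ i then dig p i else 0)
      = ∑ t ∈ Finset.range (qn - j), dig p (t + j) := by
    have hsub : Finset.Ico j qn ⊆ Finset.range qn := by
      intro x hx
      simp only [Finset.mem_Ico] at hx
      simp only [Finset.mem_range]
      omega
    rw [← Finset.sum_subset hsub (fun i hi his => ?_)]
    · rw [Finset.sum_congr rfl fun i hi => ?_, Finset.sum_Ico_eq_sum_range]
      · refine Finset.sum_congr rfl fun t _ => ?_
        congr 1
        omega
      · simp only [Finset.mem_Ico] at hi
        rw [if_pos hi.1]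
    · simp only [Finset.mem_range, Finset.mem_Ico] at hi his
      rw [if_neg (by omega)]
  rw [step1, step2]

theorem sum_win_eq (p : Int) (qn kn : Nat) :
    ∑ t ∈ Finset.range (qn + 6), win p qn kn t
      = ∑ i ∈ Finset.range qn, dig p i * coefC p kn i := by
  unfold win
  rw [Finset.sum_comm]
  have hj : ∀ j ∈ Finset.range kn,
      ∑ t ∈ Finset.range (qn + 6), digP p qn (t + j) * p ^ j
        = ∑ i ∈ Finset.range qn, (if j ≤ i then dig p i else 0) * p ^ j := by
    intro j _
    rw [← Finset.sum_mul, digSumShift, Finset.sum_mul]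
  rw [Finset.sum_congr rfl hj, Finset.sum_comm]
  refine Finset.sum_congr rfl fun i _ => ?_
  have : ∀ j ∈ Finset.range kn,
      (if j ≤ i then dig p i else 0) * p ^ j
        = (if j ≤ i then dig p i * p ^ j else 0) := by
    intro j _
    split <;> simp
  have hsub : Finset.range (min kn (i + 1)) ⊆ Finset.range kn := by
    intro x hx
    simp only [Finset.mem_range] at hx ⊢
    omega
  have hz : ∀ j ∈ Finset.range kn, j ∉ Finset.range (min kn (i + 1)) →
      (if j ≤ i then dig p i * p ^ j else 0) = 0 := by
    intro j hj hjs
    simp only [Finset.mem_range] at hj hjs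
    rw [if_neg (by omega)]
  rw [Finset.sum_congr rfl this, ← Finset.sum_subset hsub hz, coefC, Finset.mul_sum]
  refine Finset.sum_congr rfl fun j hj => ?_
  simp only [Finset.mem_range] at hj
  rw [if_pos (by omega)]

theorem go_alt_char (p q k : Int) (hk : 1 ≤ k) :
    go_alt p q k
      = Int.fmod (∑ i ∈ Finset.range q.toNat, dig p i * coefC p k.toNat i) (p ^ k.toNat) := by
  obtain ⟨kn, rfl⟩ : ∃ kn : Nat, k = (kn : Int) := ⟨k.toNat, by omega⟩
  have hkn : 1 ≤ kn := by omega
  unfold go_alt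
  dsimp only
  simp only [Int.toNat_natCast]
  rw [pymod_eq, show (290797 : Int) = sseq 0 from rfl]
  have key := goAltLoop_eq p kn hkn q.toNat 0 0 0
  simp only [Nat.cast_zero, Nat.zero_min, Finset.range_zero, Finset.sum_empty, pow_zero,
    zero_add] at key
  rw [key, geo_eq p kn]
  congr 1
  rw [Finset.sum_mul, ← Finset.sum_add_distrib]
  refine Finset.sum_congr rfl fun u hu => ?_
  by_cases h : u < kn - 1
  · rw [if_pos h, if_neg (by omega), zero_mul, add_zero]
  · rw [if_neg h, if_pos (by omega), zero_add, coefC, show min kn (u + 1) = kn from by omega]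

-- ===== VERDICT (by name: the statement is the Claim_ definition above) =====
theorem go_spec : Claim_equal_go := by
  intro p q k _hdom hpre
  obtain ⟨hp, hk⟩ := hpre
  unfold Spec_go
  rw [go_char p q k hp hk, go_alt_char p q k hk, sum_win_eq]
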